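-- pv_equiv track=rewrite | github.com/PauloPSAS/beecrowd-problemas | python/strings/1024.py | criptografa
-- ===== SOURCE A (Python) =====
-- def criptografa(txt):
--     txtCp = []
--
--     # Primeira passada: Desloca todos os caracteres alfabéticos 3 casas à direita na tabela ASCII.
--     for letra in txt:
--         if letra.isalpha():
--             txtCp.append(chr(ord(letra) + 3))
--         else:
--             txtCp.append(letra)
--
--     # Segunda passada: Inverte o texto.
--     txtCpInvertido = txtCp[::-1]
--
--     # Terceira passada: Desloca uma casa à esquerda a partir da metade do texto.
--     metade = len(txtCpInvertido) // 2
--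
--     for i in range(metade, len(txtCpInvertido)):
--         txtCpInvertido[i] = chr(ord(txtCpInvertido[i]) - 1)
--
--     # Junta a lista em uma string e retorna.
--     return ''.join(txtCpInvertido)
-- ===== SOURCE B (Python) =====
-- def criptografa(txt):
--     # Table-driven: precompute two ASCII translation tables (shift-by-3 for
--     # letters, and the same composed with the uniform -1 shift), then assemble
--     # the result from two translated, reversed slices -- no per-character loop.
--     n = len(txt)
--     k = n - n // 2  # source chars txt[:k] end up in the back half of the reversed text
--     enc = {c: c + 3 if chr(c).isalpha() else c for c in range(128)}
--     enc_dec = {c: (c + 3 if chr(c).isalpha() else c) - 1 for c in range(128)}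
--     return txt[k:].translate(enc)[::-1] + txt[:k].translate(enc_dec)[::-1]
-- ===== Notes on version B (the rewrite author's own statement) =====
-- stated objective: faster
-- what changed: Replaces A's per-character Python loops (append loop, reversal, in-place mutation loop) with a table-driven construction: two precomputed 128-entry ASCII translation tables applied via C-level str.translate to the slices txt[k:] and txt[:k] (k = n - n//2), whose reversals are concatenated; no per-character Python-level loop remains.
import Mathlib
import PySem

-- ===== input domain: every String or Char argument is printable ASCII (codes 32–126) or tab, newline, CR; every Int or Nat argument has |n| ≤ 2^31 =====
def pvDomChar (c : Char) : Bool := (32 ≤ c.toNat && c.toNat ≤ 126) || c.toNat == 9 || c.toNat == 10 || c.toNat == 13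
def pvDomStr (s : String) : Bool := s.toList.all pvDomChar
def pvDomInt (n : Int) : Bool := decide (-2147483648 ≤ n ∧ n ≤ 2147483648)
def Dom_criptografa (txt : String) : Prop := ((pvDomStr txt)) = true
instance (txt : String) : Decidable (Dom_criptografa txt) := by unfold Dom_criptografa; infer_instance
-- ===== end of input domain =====

-- B replaces A's per-character loops by two precomputed ASCII translation tables
-- applied to the slices txt[k:] and txt[:k] (k = n - n//2), reversed and concatenated.

-- ===== PORT A =====
-- Hand port of A's third pass: `for i in range(metade, len(l)): l[i] = chr(ord(l[i]) - 1)`,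
-- step for step (in-place set, index advances by one); exact since 0 ≤ i < len(l).
def pvShiftLoop (l : List Char) (i : Nat) : List Char :=
  if h : i < l.length then
    pvShiftLoop (l.set i (Char.ofNat ((l[i]).toNat - 1))) (i + 1)
  else l
termination_by l.length - i
decreasing_by simpa [List.length_set] using Nat.sub_succ_lt_self _ _ h

def criptografa (txt : String) : String :=
  -- first pass: append shifted-or-unchanged characters
  let txtCp : List Char := txt.toList.foldl
    (fun acc letra =>
      if PySem.Chars.isalpha letra then acc ++ [Char.ofNat (letra.toNat + 3)]
      else acc ++ [letra]) []
  -- second pass: txtCp[::-1]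
  let txtCpInvertido := txtCp.reverse
  -- metade = len // 2 (nonnegative, so Nat division is exact)
  let metade := txtCpInvertido.length / 2
  -- third pass: in-place left shift from metade on
  String.ofList (pvShiftLoop txtCpInvertido metade)

-- ===== PORT B =====
-- dict comprehension {c: c + 3 if chr(c).isalpha() else c for c in range(128)}
def pvTableEnc : PySem.Dict Int Int :=
  (PySem.List.pyRange 0 128 1).foldl
    (fun d c => d.insert c (if PySem.Chars.isalpha (Char.ofNat c.toNat) then c + 3 else c))
    PySem.Dict.empty

-- dict comprehension {c: (c + 3 if chr(c).isalpha() else c) - 1 for c in range(128)}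
def pvTableEncDec : PySem.Dict Int Int :=
  (PySem.List.pyRange 0 128 1).foldl
    (fun d c => d.insert c ((if PySem.Chars.isalpha (Char.ofNat c.toNat) then c + 3 else c) - 1))
    PySem.Dict.empty

-- Hand port of str.translate with an int→int table (no PySem primitive): each
-- character's code point is looked up, a mapped one is replaced by chr(value),
-- an unmapped one is kept. Exact here: every table value is a valid code point.
def pvTranslate (cs : List Char) (d : PySem.Dict Int Int) : List Char :=
  cs.map (fun ch =>
    match d.get? (ch.toNat : Int) with
    | some v => Char.ofNat v.toNat
    | none => ch)

def criptografa_alt (txt : String) : String :=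
  let cs := txt.toList
  let n : Int := cs.length
  let k : Int := n - PySem.Int.floordiv n 2
  -- txt[k:].translate(enc)[::-1] + txt[:k].translate(enc_dec)[::-1]
  String.ofList
    ((pvTranslate (PySem.List.slice cs (some k) none) pvTableEnc).reverse ++
     (pvTranslate (PySem.List.slice cs none (some k)) pvTableEncDec).reverse)

-- ===== PRECONDITION & SPEC =====
def Spec_criptografa (txt : String) (out : String) : Prop := out = criptografa_alt txt
instance (txt : String) (out : String) : Decidable (Spec_criptografa txt out) := by unfold Spec_criptografa; infer_instance

-- ===== CLAIM (what is proved, stated in full; the proofs are below) =====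
def Claim_equal_criptografa : Prop := ∀ (txt : String), Dom_criptografa txt → Spec_criptografa txt (criptografa txt)

-- ===== LEMMAS AND PROOFS =====

def pvEnc (c : Char) : Char :=
  if PySem.Chars.isalpha c then Char.ofNat (c.toNat + 3) else c

def pvDec (c : Char) : Char := Char.ofNat (c.toNat - 1)

lemma pvFold_map (xs : List Char) (acc : List Char) :
    xs.foldl (fun acc letra =>
      if PySem.Chars.isalpha letra then acc ++ [Char.ofNat (letra.toNat + 3)]
      else acc ++ [letra]) acc = acc ++ xs.map pvEnc := by
  induction xs generalizing acc with
  | nil => simp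
  | cons x xs ih =>
      simp only [List.foldl_cons, List.map_cons]
      by_cases hx : PySem.Chars.isalpha x
      · rw [if_pos hx, ih]; simp [pvEnc, hx]
      · rw [if_neg hx, ih]; simp [pvEnc, hx]

lemma pvShiftLoop_eq (l : List Char) (i : Nat) :
    pvShiftLoop l i = l.take i ++ (l.drop i).map pvDec := by
  by_cases h : i < l.length
  · rw [pvShiftLoop, dif_pos h]
    rw [pvShiftLoop_eq (l.set i (Char.ofNat ((l[i]).toNat - 1))) (i + 1)]
    rw [List.set_eq_take_cons_drop _ h]
    have hlt : (l.take i).length = i := by simp; omega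
    rw [List.take_append, List.drop_append, hlt]
    simp only [Nat.add_sub_cancel_left, List.take_succ_cons, List.take_zero,
      List.drop_succ_cons]
    rw [List.take_of_length_le (by omega), List.drop_of_length_le (by omega)]
    simp only [List.nil_append, List.drop_zero, List.map_drop]
    rw [List.drop_eq_getElem_cons (show i < (List.map pvDec l).length by simpa using h)]
    simp [pvDec]
  · rw [pvShiftLoop, dif_neg h]
    have : l.length ≤ i := by omega
    simp [List.take_of_length_le this, List.drop_of_length_le this]
termination_by l.length - i
decreasing_by simpa [List.length_set] using Nat.sub_succ_lt_self _ _ h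

lemma pvToNat_ofNat (n : Nat) (h : n < 55296) : (Char.ofNat n).toNat = n := by
  rw [Char.toNat_ofNat, if_pos (Or.inl h)]

set_option maxRecDepth 100000 in
lemma pvTableEnc_get (m : Nat) (hm : m < 128) :
    pvTableEnc.get? (m : Int) =
      some (if PySem.Chars.isalpha (Char.ofNat m) then (m : Int) + 3 else (m : Int)) := by
  have h : (List.range 128).all (fun m =>
      pvTableEnc.get? (m : Int) ==
        some (if PySem.Chars.isalpha (Char.ofNat m) then (m : Int) + 3 else (m : Int))) = true := by
    decide
  have := List.all_eq_true.mp h m (List.mem_range.mpr hm)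
  exact eq_of_beq this

set_option maxRecDepth 100000 in
lemma pvTableEncDec_get (m : Nat) (hm : m < 128) :
    pvTableEncDec.get? (m : Int) =
      some ((if PySem.Chars.isalpha (Char.ofNat m) then (m : Int) + 3 else (m : Int)) - 1) := by
  have h : (List.range 128).all (fun m =>
      pvTableEncDec.get? (m : Int) ==
        some ((if PySem.Chars.isalpha (Char.ofNat m) then (m : Int) + 3 else (m : Int)) - 1)) = true := by
    decide
  have := List.all_eq_true.mp h m (List.mem_range.mpr hm)
  exact eq_of_beq this

lemma pvTranslate_enc (cs : List Char) (hdom : ∀ c ∈ cs, pvDomChar c = true) :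
    pvTranslate cs pvTableEnc = cs.map pvEnc := by
  unfold pvTranslate
  apply List.map_congr_left
  intro c hc
  have hd := hdom c hc
  have h128 : c.toNat < 128 := by
    simp [pvDomChar] at hd; omega
  rw [pvTableEnc_get c.toNat h128, Char.ofNat_toNat c]
  by_cases ha : PySem.Chars.isalpha c
  · simp only [ha, if_true]
    simp only [pvEnc, if_pos ha]
    congr 1
  · simp [ha, pvEnc, Char.ofNat_toNat]


lemma pvTranslate_encDec (cs : List Char) (hdom : ∀ c ∈ cs, pvDomChar c = true) :
    pvTranslate cs pvTableEncDec = cs.map (fun c => pvDec (pvEnc c)) := by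
  unfold pvTranslate
  apply List.map_congr_left
  intro c hc
  have hd := hdom c hc
  have h128 : c.toNat < 128 := by
    simp [pvDomChar] at hd; omega
  rw [pvTableEncDec_get c.toNat h128, Char.ofNat_toNat c]
  by_cases ha : PySem.Chars.isalpha c
  · simp only [ha, if_true]
    simp only [pvEnc, pvDec, if_pos ha]
    rw [pvToNat_ofNat (c.toNat + 3) (by omega)]
    congr 1; omega
  · simp only [ha, if_false, Bool.false_eq_true]
    simp only [pvEnc, pvDec, if_neg ha]
    congr 1; omega

theorem criptografa_eq_alt (txt : String) (hdom : Dom_criptografa txt) :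
    criptografa txt = criptografa_alt txt := by
  have hall : ∀ c ∈ txt.toList, pvDomChar c = true := by
    intro c hc
    exact List.all_eq_true.mp hdom c hc
  unfold criptografa criptografa_alt
  simp only []
  rw [pvFold_map, pvShiftLoop_eq]
  set cs := txt.toList with hcs
  -- the Int arithmetic: k = n - n//2 as a Nat
  have hk : ((cs.length : Int) - PySem.Int.floordiv (cs.length : Int) 2) =
      ((cs.length - cs.length / 2 : Nat) : Int) := by
    rw [show ((2 : Int)) = ((2 : Nat) : Int) by norm_num, PySem.Int.floordiv_natCast]
    push_cast [Nat.cast_sub (Nat.div_le_self _ _)]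
    ring
  rw [hk, PySem.List.slice_from_natCast, PySem.List.slice_to_natCast]
  rw [pvTranslate_enc _ (fun c hc => hall c (List.mem_of_mem_drop hc)),
      pvTranslate_encDec _ (fun c hc => hall c (List.mem_of_mem_take hc))]
  simp only [List.nil_append, List.length_reverse, List.length_map]
  congr 1
  set n := cs.length
  set h := n / 2 with hh
  set k := n - n / 2 with hk2
  have h1 : (cs.map pvEnc).reverse.take h = (cs.map pvEnc |>.drop k).reverse := by
    rw [List.take_reverse]
    congr 2
    simp [hh, hk2]
    omega
  have h2 : (cs.map pvEnc).reverse.drop h = (cs.map pvEnc |>.take k).reverse := by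
    rw [List.drop_reverse]
    congr 2
    simp [hh, hk2]
    omega
  rw [h1, h2, List.map_reverse, List.map_drop, List.map_take, List.map_map]
  simp [Function.comp_def]

-- ===== VERDICT (by name: the statement is the Claim_ definition above) =====
theorem criptografa_spec : Claim_equal_criptografa := by
  intro txt hdom
  unfold Spec_criptografa
  exact criptografa_eq_alt txt hdom
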